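-- pv_equiv track=rewrite | github.com/bgyehi/2025_IDM_Lab_Study | 5차과제.py | block_full_search
-- ===== SOURCE A (Python) =====
-- def total_tardiness(sequence, p, d):
--     time_sum = 0
--     tardiness = 0
--     for job in sequence:
--         time_sum += p[job]
--         tardiness += max(0, time_sum - d[job])
--     return tardiness
--
-- def block_reverse(seq, i, j):
--     new_seq = seq[:]
--     new_seq[i:j + 1] = reversed(new_seq[i:j + 1])
--     return new_seq
--
-- def block_full_search(seq, p, d):
--     best_seq = seq[:]
--     best_tardiness = total_tardiness(best_seq, p, d)
--     for i in range(len(seq) - 1):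
--         for j in range(i + 1, len(seq)):
--             new_seq = block_reverse(best_seq, i, j)
--             new_tardiness = total_tardiness(new_seq, p, d)
--             if new_tardiness < best_tardiness:
--                 best_seq = new_seq
--                 best_tardiness = new_tardiness
--     return best_seq, best_tardiness
-- ===== SOURCE B (Python) =====
-- # Same greedy accept-first local search, but each candidate's tardiness is computed from
-- # prefix tables (cumulative completion time / cumulative tardiness of the current best_seq)
-- # plus a walk over the reversed block only, instead of copying the whole sequence and
-- # recomputing the full tardiness sum for every candidate.
-- def block_full_search(seq, p, d):
--     best_seq = seq[:]
--     n = len(best_seq)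
--
--     def tables(s):
--         # prefT[k] = tardiness of the first k jobs of s; prefP[k] = their total processing time
--         prefT = [0]
--         prefP = [0]
--         t = 0
--         tard = 0
--         for job in s:
--             t += p[job]
--             tard += max(0, t - d[job])
--             prefT.append(tard)
--             prefP.append(t)
--         return prefT, prefP
--
--     prefT, prefP = tables(best_seq)
--     best_tardiness = prefT[n]
--     for i in range(n - 1):
--         for j in range(i + 1, n):
--             t = prefP[i]
--             tard = prefT[i]
--             for job in reversed(best_seq[i:j + 1]):
--                 t += p[job]
--                 tard += max(0, t - d[job])
--             # the suffix tardiness is unchanged: the block's total processing time is invariant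
--             cand = tard + (best_tardiness - prefT[j + 1])
--             if cand < best_tardiness:
--                 best_seq = best_seq[:i] + best_seq[i:j + 1][::-1] + best_seq[j + 1:]
--                 prefT, prefP = tables(best_seq)
--                 best_tardiness = prefT[n]
--     return best_seq, best_tardiness
-- ===== Notes on version B (the rewrite author's own statement) =====
-- stated objective: faster
-- what changed: A copies the sequence and recomputes the whole tardiness sum for every candidate block reversal; B maintains prefix tables (cumulative processing time and cumulative tardiness) of the current best sequence, evaluates each candidate as prefix + walk over the reversed block + unchanged suffix tardiness (the block's total processing time is invariant), and rebuilds the tables only when a better sequence is accepted.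
import Mathlib
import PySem

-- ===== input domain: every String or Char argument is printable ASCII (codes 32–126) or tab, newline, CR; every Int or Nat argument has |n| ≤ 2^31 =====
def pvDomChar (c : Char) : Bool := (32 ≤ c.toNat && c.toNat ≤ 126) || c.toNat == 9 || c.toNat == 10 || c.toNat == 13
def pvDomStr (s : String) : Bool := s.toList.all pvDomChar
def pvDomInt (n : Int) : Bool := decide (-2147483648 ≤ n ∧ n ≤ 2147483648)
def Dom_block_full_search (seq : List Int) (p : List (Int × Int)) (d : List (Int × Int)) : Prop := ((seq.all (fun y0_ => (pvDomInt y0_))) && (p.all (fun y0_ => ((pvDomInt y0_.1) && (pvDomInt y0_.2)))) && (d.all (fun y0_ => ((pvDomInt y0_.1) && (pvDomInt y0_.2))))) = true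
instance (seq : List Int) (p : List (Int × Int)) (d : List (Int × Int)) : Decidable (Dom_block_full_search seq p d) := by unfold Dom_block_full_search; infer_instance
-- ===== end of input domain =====

-- B replaces A's per-candidate full-sequence copy + tardiness recompute by prefix tables of the
-- current best sequence plus a walk over the reversed block only (same greedy acceptance order).


-- ===== PORT A =====
-- p[job] / d[job]: dict lookup on the assoc list (first match, per the type convention);
-- the default 0 is never used under Pre_ (every job of seq is a key of both dicts; KeyError is excluded there)
def dget (m : List (Int × Int)) (k : Int) : Int := (List.lookup k m).getD 0

def total_tardiness (sequence : List Int) (p : List (Int × Int)) (d : List (Int × Int)) : Int :=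
  (sequence.foldl (fun (st : Int × Int) job =>
      let time_sum := st.1 + dget p job
      (time_sum, st.2 + max 0 (time_sum - dget d job))) (0, 0)).2

-- slice assignment new_seq[i:j+1] = reversed(new_seq[i:j+1]); exact for 0 ≤ i ≤ j < len, the only call pattern
def block_reverse (seq : List Int) (i : Int) (j : Int) : List Int :=
  PySem.List.slice seq none (some i) ++ (PySem.List.slice seq (some i) (some (j + 1))).reverse
    ++ PySem.List.slice seq (some (j + 1)) none

def block_full_search (seq : List Int) (p : List (Int × Int)) (d : List (Int × Int)) : List Int × Int :=
  let best_seq := seq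
  let best_tardiness := total_tardiness best_seq p d
  (PySem.List.pyRange 0 ((seq.length : Int) - 1) 1).foldl (fun (st : List Int × Int) i =>
    (PySem.List.pyRange (i + 1) (seq.length : Int) 1).foldl (fun (st : List Int × Int) j =>
      let new_seq := block_reverse st.1 i j
      let new_tardiness := total_tardiness new_seq p d
      if new_tardiness < st.2 then (new_seq, new_tardiness) else st) st)
    (best_seq, best_tardiness)

-- ===== PORT B =====
-- tables(s): one forward pass appending prefT[k] (tardiness of first k jobs) and prefP[k] (their processing time)
def tablesB (p : List (Int × Int)) (d : List (Int × Int)) (s : List Int) : List Int × List Int :=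
  let st := s.foldl (fun (st : List Int × List Int × Int × Int) job =>
      let t := st.2.2.1 + dget p job
      let tard := st.2.2.2 + max 0 (t - dget d job)
      (st.1 ++ [tard], st.2.1 ++ [t], t, tard)) ([0], [0], 0, 0)
  (st.1, st.2.1)

def block_full_search_alt (seq : List Int) (p : List (Int × Int)) (d : List (Int × Int)) : List Int × Int :=
  let best_seq := seq
  let n := best_seq.length
  let tabs := tablesB p d best_seq
  -- state: (best_seq, best_tardiness, prefT, prefP); prefT[n] via pyGetD (always in range)
  let st0 : List Int × Int × List Int × List Int :=
    (best_seq, PySem.List.pyGetD tabs.1 (n : Int) 0, tabs.1, tabs.2)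
  let st := (PySem.List.pyRange 0 ((n : Int) - 1) 1).foldl (fun (st : List Int × Int × List Int × List Int) i =>
    (PySem.List.pyRange (i + 1) (n : Int) 1).foldl (fun (st : List Int × Int × List Int × List Int) j =>
      -- walk the reversed block [i..j]; best_seq[i:j+1][::-1] is slice-then-reverse (PySem.List.slice?_none_none_neg_one)
      let w := ((PySem.List.slice st.1 (some i) (some (j + 1))).reverse).foldl
          (fun (w : Int × Int) job =>
            let t := w.1 + dget p job
            (t, w.2 + max 0 (t - dget d job)))
          (PySem.List.pyGetD st.2.2.2 i 0, PySem.List.pyGetD st.2.2.1 i 0)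
      let cand := w.2 + (st.2.1 - PySem.List.pyGetD st.2.2.1 (j + 1) 0)
      if cand < st.2.1 then
        let ns := PySem.List.slice st.1 none (some i) ++ (PySem.List.slice st.1 (some i) (some (j + 1))).reverse
            ++ PySem.List.slice st.1 (some (j + 1)) none
        let tabs := tablesB p d ns
        (ns, PySem.List.pyGetD tabs.1 (n : Int) 0, tabs.1, tabs.2)
      else st) st) st0
  (st.1, st.2.1)

-- ===== PRECONDITION & SPEC =====
-- Pre_ excludes exactly the inputs on which A raises KeyError: some job of seq missing from p or d.
def Pre_block_full_search (seq : List Int) (p : List (Int × Int)) (d : List (Int × Int)) : Prop :=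
  ∀ x ∈ seq, (List.lookup x p).isSome = true ∧ (List.lookup x d).isSome = true
instance (seq : List Int) (p : List (Int × Int)) (d : List (Int × Int)) : Decidable (Pre_block_full_search seq p d) := by unfold Pre_block_full_search; infer_instance
def pvWitness_block_full_search : List Int × (List (Int × Int)) × (List (Int × Int)) :=
  ([1, 0, 2], [(0, 3), (1, 2), (2, 4)], [(0, 2), (1, 9), (2, 4)])

def Spec_block_full_search (seq : List Int) (p : List (Int × Int)) (d : List (Int × Int)) (out : List Int × Int) : Prop := out = block_full_search_alt seq p d
instance (seq : List Int) (p : List (Int × Int)) (d : List (Int × Int)) (out : List Int × Int) : Decidable (Spec_block_full_search seq p d out) := by unfold Spec_block_full_search; infer_instance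

-- ===== CLAIM (what is proved, stated in full; the proofs are below) =====
def Claim_equal_block_full_search : Prop := ∀ (seq : List Int) (p : List (Int × Int)) (d : List (Int × Int)), Dom_block_full_search seq p d → Pre_block_full_search seq p d → Spec_block_full_search seq p d (block_full_search seq p d)

-- ===== LEMMAS AND PROOFS =====

-- total processing time of a job list
def sumP (p : List (Int × Int)) (s : List Int) : Int := (s.map (fun job => dget p job)).sum

-- tardiness of job list s started at time t
def tardFrom (p d : List (Int × Int)) : List Int → Int → Int
  | [], _ => 0
  | job :: rest, t => max 0 (t + dget p job - dget d job)
      + tardFrom p d rest (t + dget p job)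

-- the shared loop body of both ports
lemma tard_foldl (p d : List (Int × Int)) (s : List Int) : ∀ (t0 c0 : Int),
    s.foldl (fun (st : Int × Int) job =>
      (st.1 + dget p job,
       st.2 + max 0 (st.1 + dget p job - dget d job))) (t0, c0)
    = (t0 + sumP p s, c0 + tardFrom p d s t0) := by
  induction s with
  | nil => intro t0 c0; simp [sumP, tardFrom]
  | cons a s ih =>
      intro t0 c0
      simp only [List.foldl_cons, ih, sumP, tardFrom, List.map_cons, List.sum_cons]
      simp only [Prod.mk.injEq]; constructor <;> ring

lemma total_eq_tardFrom (p d : List (Int × Int)) (s : List Int) :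
    total_tardiness s p d = tardFrom p d s 0 := by
  simp [total_tardiness, tard_foldl]

lemma tardFrom_append (p d : List (Int × Int)) (xs ys : List Int) : ∀ t : Int,
    tardFrom p d (xs ++ ys) t = tardFrom p d xs t + tardFrom p d ys (t + sumP p xs) := by
  induction xs with
  | nil => intro t; simp [tardFrom, sumP]
  | cons a xs ih =>
      intro t
      simp only [List.cons_append, tardFrom, ih, sumP, List.map_cons, List.sum_cons]
      ring_nf

@[simp] lemma sumP_reverse (p : List (Int × Int)) (xs : List Int) : sumP p xs.reverse = sumP p xs := by
  simp [sumP, List.map_reverse, List.sum_reverse]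

lemma sumP_append (p : List (Int × Int)) (xs ys : List Int) :
    sumP p (xs ++ ys) = sumP p xs + sumP p ys := by
  simp [sumP]

-- specification of the prefix tables
def pTspec (p d : List (Int × Int)) (s : List Int) : List Int :=
  (List.range (s.length + 1)).map (fun k => tardFrom p d (s.take k) 0)
def pPspec (p : List (Int × Int)) (s : List Int) : List Int :=
  (List.range (s.length + 1)).map (fun k => sumP p (s.take k))

lemma pTspec_append (p d : List (Int × Int)) (s : List Int) (a : Int) :
    pTspec p d (s ++ [a]) = pTspec p d s ++ [tardFrom p d (s ++ [a]) 0] := by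
  simp only [pTspec, List.length_append, List.length_singleton, List.range_succ (n := s.length + 1),
    List.map_append, List.map_cons, List.map_nil]
  congr 1
  · exact List.map_congr_left (fun k hk => by
      rw [List.take_append_of_le_length (by simpa using Nat.lt_succ_iff.mp (List.mem_range.mp hk))])
  · rw [List.take_of_length_le (by simp)]

lemma pPspec_append (p : List (Int × Int)) (s : List Int) (a : Int) :
    pPspec p (s ++ [a]) = pPspec p s ++ [sumP p (s ++ [a])] := by
  simp only [pPspec, List.length_append, List.length_singleton, List.range_succ (n := s.length + 1),
    List.map_append, List.map_cons, List.map_nil]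
  congr 1
  · exact List.map_congr_left (fun k hk => by
      rw [List.take_append_of_le_length (by simpa using Nat.lt_succ_iff.mp (List.mem_range.mp hk))])
  · rw [List.take_of_length_le (by simp)]

lemma tables_foldl (p d : List (Int × Int)) (s : List Int) :
    s.foldl (fun (st : List Int × List Int × Int × Int) job =>
      (st.1 ++ [st.2.2.2 + max 0 (st.2.2.1 + dget p job - dget d job)],
       st.2.1 ++ [st.2.2.1 + dget p job],
       st.2.2.1 + dget p job,
       st.2.2.2 + max 0 (st.2.2.1 + dget p job - dget d job)))
      ([0], [0], 0, 0)
    = (pTspec p d s, pPspec p s, sumP p s, tardFrom p d s 0) := by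
  induction s using List.reverseRecOn with
  | nil => simp [pTspec, pPspec, sumP, tardFrom]
  | append_singleton s a ih =>
      rw [List.foldl_append, ih, List.foldl_cons, List.foldl_nil,
        pTspec_append, pPspec_append]
      have h1 : sumP p (s ++ [a]) = sumP p s + dget p a := by
        simp [sumP]
      have h2 : tardFrom p d (s ++ [a]) 0
          = tardFrom p d s 0 + max 0 (sumP p s + dget p a - dget d a) := by
        rw [tardFrom_append]
        simp [tardFrom]
      rw [h1, h2]

lemma tablesB_eq (p d : List (Int × Int)) (s : List Int) :
    tablesB p d s = (pTspec p d s, pPspec p s) := by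
  simp only [tablesB, tables_foldl]

lemma pT_lookup (p d : List (Int × Int)) (s : List Int) (i : Int) (h0 : 0 ≤ i)
    (h1 : i ≤ (s.length : Int)) :
    PySem.List.pyGetD (pTspec p d s) i 0 = tardFrom p d (s.take i.toNat) 0 := by
  rw [PySem.List.pyGetD_eq_getElem (pTspec p d s) 0 h0 (by simp [pTspec]; omega)]
  simp [pTspec]

lemma pP_lookup (p : List (Int × Int)) (s : List Int) (i : Int) (h0 : 0 ≤ i)
    (h1 : i ≤ (s.length : Int)) :
    PySem.List.pyGetD (pPspec p s) i 0 = sumP p (s.take i.toNat) := by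
  rw [PySem.List.pyGetD_eq_getElem (pPspec p s) 0 h0 (by simp [pPspec]; omega)]
  simp [pPspec]

lemma blockRev_decomp (s : List Int) (i j : Int) (h0 : 0 ≤ i) (hij : i < j)
    (_hj : j < (s.length : Int)) :
    block_reverse s i j
      = s.take i.toNat ++ ((s.drop i.toNat).take ((j + 1).toNat - i.toNat)).reverse
          ++ s.drop (j + 1).toNat := by
  rw [block_reverse, PySem.List.slice_to s h0, PySem.List.slice_toNat s h0 (by omega),
    PySem.List.slice_from s (by omega)]

lemma blockRev_length (s : List Int) (i j : Int) (h0 : 0 ≤ i) (hij : i < j)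
    (hj : j < (s.length : Int)) : (block_reverse s i j).length = s.length := by
  rw [blockRev_decomp s i j h0 hij hj]
  simp only [List.length_append, List.length_reverse, List.length_take, List.length_drop]
  omega

-- the key fact: B's prefix+walk+suffix candidate value equals A's full recompute
lemma cand_eq (p d : List (Int × Int)) (s : List Int) (i j : Int) (h0 : 0 ≤ i) (hij : i < j)
    (hj : j < (s.length : Int)) :
    (((PySem.List.slice s (some i) (some (j + 1))).reverse).foldl
        (fun (w : Int × Int) job =>
          (w.1 + dget p job,
           w.2 + max 0 (w.1 + dget p job - dget d job)))
        (PySem.List.pyGetD (pPspec p s) i 0, PySem.List.pyGetD (pTspec p d s) i 0)).2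
      + (tardFrom p d s 0 - PySem.List.pyGetD (pTspec p d s) (j + 1) 0)
    = tardFrom p d (block_reverse s i j) 0 := by
  have hiL : i ≤ (s.length : Int) := by omega
  have hjL : j + 1 ≤ (s.length : Int) := by omega
  rw [pP_lookup p s i h0 hiL, pT_lookup p d s i h0 hiL, pT_lookup p d s (j + 1) (by omega) hjL,
    PySem.List.slice_toNat s h0 (by omega), tard_foldl, blockRev_decomp s i j h0 hij hj]
  set M : List Int := (s.drop i.toNat).take ((j + 1).toNat - i.toNat)
  -- decompose s itself at j+1 and then at i
  have hsplit : s.take (j + 1).toNat = s.take i.toNat ++ M := by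
    have : (j + 1).toNat = i.toNat + ((j + 1).toNat - i.toNat) := by omega
    rw [this, List.take_add]
  have hs : tardFrom p d s 0
      = tardFrom p d (s.take (j + 1).toNat) 0
        + tardFrom p d (s.drop (j + 1).toNat) (0 + sumP p (s.take (j + 1).toNat)) := by
    conv_lhs => rw [← List.take_append_drop (j + 1).toNat s]
    rw [tardFrom_append]
  have hsum : sumP p (s.take (j + 1).toNat) = sumP p (s.take i.toNat) + sumP p M.reverse := by
    rw [hsplit, sumP_append, sumP_reverse]
  rw [tardFrom_append, tardFrom_append, hs, hsplit, tardFrom_append]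
  simp only [zero_add, sumP_append, sumP_reverse]
  ring

-- relate A's and B's loop states
def StRel (p d : List (Int × Int)) (n : Nat) (a : List Int × Int)
    (b : List Int × Int × List Int × List Int) : Prop :=
  b.1 = a.1 ∧ b.2.1 = a.2 ∧ b.2.2.1 = pTspec p d a.1 ∧ b.2.2.2 = pPspec p a.1
    ∧ a.1.length = n ∧ a.2 = tardFrom p d a.1 0

lemma foldl_rel {α β γ : Type} (R : β → γ → Prop) (f : β → α → β) (g : γ → α → γ)
    (l : List α) (h : ∀ x ∈ l, ∀ b c, R b c → R (f b x) (g c x)) :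
    ∀ b c, R b c → R (l.foldl f b) (l.foldl g c) := by
  induction l with
  | nil => intro b c hbc; simpa using hbc
  | cons a l ih =>
      intro b c hbc
      exact ih (fun x hx => h x (List.mem_cons_of_mem _ hx)) _ _ (h a (List.mem_cons_self) b c hbc)

-- ===== VERDICT (by name: the statement is the Claim_ definition above) =====
lemma inner_step (p d : List (Int × Int)) (n : Nat) (i j : Int) (h0 : 0 ≤ i) (hij : i < j)
    (hj : j < (n : Int)) (a : List Int × Int) (b : List Int × Int × List Int × List Int)
    (hR : StRel p d n a b) :
    StRel p d n
      (let new_seq := block_reverse a.1 i j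
       let new_tardiness := total_tardiness new_seq p d
       if new_tardiness < a.2 then (new_seq, new_tardiness) else a)
      (let w := ((PySem.List.slice b.1 (some i) (some (j + 1))).reverse).foldl
          (fun (w : Int × Int) job =>
            (w.1 + dget p job,
             w.2 + max 0 (w.1 + dget p job - dget d job)))
          (PySem.List.pyGetD b.2.2.2 i 0, PySem.List.pyGetD b.2.2.1 i 0)
       let cand := w.2 + (b.2.1 - PySem.List.pyGetD b.2.2.1 (j + 1) 0)
       if cand < b.2.1 then
         let ns := PySem.List.slice b.1 none (some i)
             ++ (PySem.List.slice b.1 (some i) (some (j + 1))).reverse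
             ++ PySem.List.slice b.1 (some (j + 1)) none
         let tabs := tablesB p d ns
         (ns, PySem.List.pyGetD tabs.1 (n : Int) 0, tabs.1, tabs.2)
       else b) := by
  obtain ⟨hb1, hb2, hb3, hb4, hlen, hval⟩ := hR
  have hjs : j < (a.1.length : Int) := by rw [hlen]; exact hj
  have hcand :
      (((PySem.List.slice b.1 (some i) (some (j + 1))).reverse).foldl
          (fun (w : Int × Int) job =>
            (w.1 + dget p job,
             w.2 + max 0 (w.1 + dget p job - dget d job)))
          (PySem.List.pyGetD b.2.2.2 i 0, PySem.List.pyGetD b.2.2.1 i 0)).2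
        + (b.2.1 - PySem.List.pyGetD b.2.2.1 (j + 1) 0)
      = total_tardiness (block_reverse a.1 i j) p d := by
    rw [hb1, hb2, hb3, hb4, hval, total_eq_tardFrom]
    exact cand_eq p d a.1 i j h0 hij hjs
  simp only [hcand]
  by_cases hlt : total_tardiness (block_reverse a.1 i j) p d < a.2
  · have hns : (PySem.List.slice b.1 none (some i)
        ++ (PySem.List.slice b.1 (some i) (some (j + 1))).reverse
        ++ PySem.List.slice b.1 (some (j + 1)) none) = block_reverse a.1 i j := by
      rw [hb1, block_reverse]
    have hlen' : (block_reverse a.1 i j).length = n := by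
      rw [blockRev_length a.1 i j h0 hij hjs, hlen]
    rw [hb2, if_pos hlt, if_pos hlt, hns]
    refine ⟨rfl, ?_, by rw [tablesB_eq], by rw [tablesB_eq], hlen', ?_⟩
    · rw [tablesB_eq]
      show PySem.List.pyGetD (pTspec p d (block_reverse a.1 i j)) (n : Int) 0 = _
      rw [pT_lookup p d _ (n : Int) (by omega) (by simp [hlen']),
        total_eq_tardFrom]
      congr 1
      rw [Int.toNat_natCast, ← hlen', List.take_length]
    · rw [total_eq_tardFrom]
  · rw [hb2, if_neg hlt, if_neg hlt]
    exact ⟨hb1, hb2, hb3, hb4, hlen, hval⟩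

theorem block_full_search_spec : Claim_equal_block_full_search := by
  intro seq p d _ _
  show block_full_search seq p d = block_full_search_alt seq p d
  simp only [block_full_search, block_full_search_alt]
  have hfin : StRel p d seq.length
      ((PySem.List.pyRange 0 ((seq.length : Int) - 1) 1).foldl (fun (st : List Int × Int) i =>
        (PySem.List.pyRange (i + 1) (seq.length : Int) 1).foldl (fun (st : List Int × Int) j =>
          let new_seq := block_reverse st.1 i j
          let new_tardiness := total_tardiness new_seq p d
          if new_tardiness < st.2 then (new_seq, new_tardiness) else st) st)
        (seq, total_tardiness seq p d))
      ((PySem.List.pyRange 0 ((seq.length : Int) - 1) 1).foldl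
        (fun (st : List Int × Int × List Int × List Int) i =>
        (PySem.List.pyRange (i + 1) (seq.length : Int) 1).foldl
          (fun (st : List Int × Int × List Int × List Int) j =>
          let w := ((PySem.List.slice st.1 (some i) (some (j + 1))).reverse).foldl
              (fun (w : Int × Int) job =>
                (w.1 + dget p job,
                 w.2 + max 0 (w.1 + dget p job - dget d job)))
              (PySem.List.pyGetD st.2.2.2 i 0, PySem.List.pyGetD st.2.2.1 i 0)
          let cand := w.2 + (st.2.1 - PySem.List.pyGetD st.2.2.1 (j + 1) 0)
          if cand < st.2.1 then
            let ns := PySem.List.slice st.1 none (some i)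
                ++ (PySem.List.slice st.1 (some i) (some (j + 1))).reverse
                ++ PySem.List.slice st.1 (some (j + 1)) none
            let tabs := tablesB p d ns
            (ns, PySem.List.pyGetD tabs.1 (seq.length : Int) 0, tabs.1, tabs.2)
          else st) st)
        (seq, PySem.List.pyGetD (tablesB p d seq).1 (seq.length : Int) 0,
          (tablesB p d seq).1, (tablesB p d seq).2)) := by
    apply foldl_rel (StRel p d seq.length)
    · intro i hi a b hab
      have hi' := (PySem.List.mem_pyRange_one.mp hi)
      apply foldl_rel (StRel p d seq.length)
      · intro j hjm a' b' hab'
        have hj' := (PySem.List.mem_pyRange_one.mp hjm)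
        exact inner_step p d seq.length i j hi'.1 (by omega) (by omega) a' b' hab'
      · exact hab
    · refine ⟨rfl, ?_, by rw [tablesB_eq], by rw [tablesB_eq], rfl, by rw [total_eq_tardFrom]⟩
      rw [tablesB_eq]
      show PySem.List.pyGetD (pTspec p d seq) ((seq.length : Int)) 0 = _
      rw [pT_lookup p d seq (seq.length : Int) (by omega) le_rfl, total_eq_tardFrom,
        Int.toNat_natCast, List.take_length]
  obtain ⟨h1, h2, _, _, _, _⟩ := hfin
  rw [h1, h2]
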